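-- pv_equiv track=rewrite | github.com/eichelb4rt/brawlball-community-rankings | evaluate.py | gen_rank_string
-- ===== SOURCE A (Python) =====
-- def gen_rank_string(points):
--     points = sorted(points.items(), key=lambda item: item[1])
--     points.reverse()
--     rank_string = ""
--     for i, (name, score) in enumerate(points):
--         if i == 0 or score != last_score:
--             current_rank = i + 1
--         rank_string += f"{current_rank}. {name} ({score} points)\n"
--         last_score = score
--     return rank_string
-- ===== SOURCE B (Python) =====
-- def gen_rank_string(points):
--     vals = list(points.values())
--     return "".join(
--         f"{1 + sum(1 for t in vals if t > s)}. {name} ({s} points)\n"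
--         for name, s in reversed(sorted(points.items(), key=lambda item: item[1]))
--     )
-- ===== Notes on version B (the rewrite author's own statement) =====
-- stated objective: alternative
-- what changed: Replaces A's stateful rank tracking (current_rank/last_score carried through an enumerate loop with string +=) by a counting definition of competition rank: each entry's rank is computed independently as 1 + the number of entries with strictly greater score, and the lines are joined; no rank state or group detection exists in B.
import Mathlib
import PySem

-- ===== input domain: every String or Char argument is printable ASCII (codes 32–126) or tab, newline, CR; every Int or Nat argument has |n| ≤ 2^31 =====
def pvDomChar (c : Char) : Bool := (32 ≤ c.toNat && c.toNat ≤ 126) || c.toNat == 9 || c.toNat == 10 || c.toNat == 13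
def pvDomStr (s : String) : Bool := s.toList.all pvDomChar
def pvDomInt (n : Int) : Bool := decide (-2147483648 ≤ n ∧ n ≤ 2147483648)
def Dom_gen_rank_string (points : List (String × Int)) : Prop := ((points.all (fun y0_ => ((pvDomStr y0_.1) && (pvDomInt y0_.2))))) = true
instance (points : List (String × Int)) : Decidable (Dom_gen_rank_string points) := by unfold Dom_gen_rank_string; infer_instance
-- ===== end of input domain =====

-- B drops A's rank state entirely: each entry's competition rank is computed
-- independently as 1 + the count of strictly greater scores; same return value, no speed claim.

-- ===== PORT A =====
-- one output line: f"{rank}. {name} ({score} points)\n"  (shared by both ports)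
def pvLine (rank : Int) (name : String) (score : Int) : String :=
  PySem.Int.toStr rank ++ ". " ++ name ++ " (" ++ PySem.Int.toStr score ++ " points)\n"

-- loop body of A: state = (rank_string, current_rank, last_score)
def pvStepA (acc : String × Int × Int) (it : Int × (String × Int)) : String × Int × Int :=
  let cur := if it.1 = 0 ∨ it.2.2 ≠ acc.2.2 then it.1 + 1 else acc.2.1
  (acc.1 ++ pvLine cur it.2.1 it.2.2, cur, it.2.2)

def gen_rank_string (points : List (String × Int)) : String :=
  let pts := (PySem.List.sorted points (fun item => item.2)).reverse
  ((PySem.List.enumerate pts).foldl pvStepA ("", 0, 0)).1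

-- ===== PORT B =====
-- vals = list(points.values()); rank of score s = 1 + sum(1 for t in vals if t > s)
def gen_rank_string_alt (points : List (String × Int)) : String :=
  let vals := points.map Prod.snd
  let pts := (PySem.List.sorted points (fun item => item.2)).reverse
  String.join (pts.map (fun p =>
    pvLine (1 + (vals.countP (fun t => decide (p.2 < t)) : Int)) p.1 p.2))

-- ===== PRECONDITION & SPEC =====
def Spec_gen_rank_string (points : List (String × Int)) (out : String) : Prop := out = gen_rank_string_alt points
instance (points : List (String × Int)) (out : String) : Decidable (Spec_gen_rank_string points out) := by unfold Spec_gen_rank_string; infer_instance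

-- ===== CLAIM (what is proved, stated in full; the proofs are below) =====
def Claim_equal_gen_rank_string : Prop := ∀ (points : List (String × Int)), Dom_gen_rank_string points → Spec_gen_rank_string points (gen_rank_string points)

-- ===== LEMMAS AND PROOFS =====

-- foldl of ++ over strings pulls a prefix out of the accumulator
lemma pvFoldAppend (l : List String) : ∀ (x y : String),
    l.foldl (· ++ ·) (x ++ y) = x ++ l.foldl (· ++ ·) y := by
  induction l with
  | nil => intro x y; simp
  | cons a t ih => intro x y; simp only [List.foldl_cons, String.append_assoc]; exact ih x (y ++ a)

lemma pvJoinCons (a : String) (l : List String) :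
    String.join (a :: l) = a ++ String.join l := by
  simp only [String.join, List.foldl_cons]
  have h := pvFoldAppend l a ""
  simpa using h

-- Main invariant: on a descending-sorted list L = pre ++ suf, A's fold over the
-- suffix (state: last written score `last`, realised by some element of pre, and
-- current rank `cur` = 1 + count of scores in L strictly above `last`) emits, for
-- every element, the line of rank 1 + (count of strictly greater scores in L).
lemma pvMain (L : List (String × Int))
    (hL : L.Pairwise (fun a b => b.2 ≤ a.2)) :
    ∀ (suf pre : List (String × Int)), L = pre ++ suf →
    ∀ (s : String) (cur last : Int),
    (pre ≠ [] → (∀ a ∈ pre, last ≤ a.2) ∧ (∃ q ∈ pre, q.2 = last) ∧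
      cur = 1 + (L.countP (fun t => decide (last < t.2)) : Int)) →
    ((PySem.List.enumerate suf (pre.length : Int)).foldl pvStepA (s, cur, last)).1
      = s ++ String.join (suf.map (fun p =>
          pvLine (1 + (L.countP (fun t => decide (p.2 < t.2)) : Int)) p.1 p.2)) := by
  intro suf
  induction suf with
  | nil => intro pre _ s cur last _; simp [PySem.List.enumerate_nil, String.join]
  | cons hd suf' ih =>
      intro pre hsplit s cur last hinv
      obtain ⟨name, sc⟩ := hd
      -- order facts from the pairwise hypothesis
      have hLsplit := hsplit ▸ hL
      rw [List.pairwise_append] at hLsplit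
      obtain ⟨hpre, hsufPW, hcross⟩ := hLsplit
      have hpre_ge : ∀ a ∈ pre, sc ≤ a.2 := fun a ha => hcross a ha (name, sc) (by simp)
      have hsuf_le : ∀ t ∈ suf', t.2 ≤ sc := by
        rw [List.pairwise_cons] at hsufPW
        exact fun t ht => hsufPW.1 t ht
      have hsuf0 : ((name, sc) :: suf').countP (fun t => decide (sc < t.2)) = 0 := by
        rw [List.countP_eq_zero]
        intro t ht
        rcases List.mem_cons.mp ht with h | h
        · subst h; simp
        · simpa using not_lt.mpr (hsuf_le t h)
      -- the rank written for this element is 1 + (count of strictly greater scores)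
      have hrank : (if (pre.length : Int) = 0 ∨ sc ≠ last then (pre.length : Int) + 1 else cur)
          = 1 + (L.countP (fun t => decide (sc < t.2)) : Int) := by
        by_cases hcond : (pre.length : Int) = 0 ∨ sc ≠ last
        · rw [if_pos hcond]
          have hpreAll : pre.countP (fun t => decide (sc < t.2)) = pre.length := by
            rw [List.countP_eq_length]
            intro a ha
            have hne2 : pre ≠ [] := by rintro rfl; simp at ha
            obtain ⟨hlast_le, ⟨q, hq, hqlast⟩, _⟩ := hinv hne2
            rcases hcond with h0 | hne
            · exfalso
              have := List.length_pos_of_ne_nil hne2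
              omega
            · have h1 : sc ≤ last := hqlast ▸ hpre_ge q hq
              have h2 : sc < last := lt_of_le_of_ne h1 hne
              simpa using lt_of_lt_of_le h2 (hlast_le a ha)
          rw [hsplit, List.countP_append, hpreAll, hsuf0]
          push_cast
          ring
        · rw [if_neg hcond]
          push Not at hcond
          obtain ⟨h0, hsceq⟩ := hcond
          have hne2 : pre ≠ [] := by
            rintro rfl; simp at h0
          obtain ⟨_, _, hcur⟩ := hinv hne2
          rw [hcur, hsceq]
      -- one step of A's fold, then the induction hypothesis on pre ++ [(name, sc)]
      rw [PySem.List.enumerate_cons, List.foldl_cons]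
      have hstep : pvStepA (s, cur, last) ((pre.length : Int), (name, sc))
          = (s ++ pvLine (1 + (L.countP (fun t => decide (sc < t.2)) : Int)) name sc,
             1 + (L.countP (fun t => decide (sc < t.2)) : Int), sc) := by
        simp only [pvStepA, hrank]
      rw [hstep]
      have hsplit' : L = (pre ++ [(name, sc)]) ++ suf' := by
        rw [hsplit]; simp
      have hlen' : ((pre ++ [(name, sc)]).length : Int) = (pre.length : Int) + 1 := by
        simp
      have hinv' : pre ++ [(name, sc)] ≠ [] →
          (∀ a ∈ pre ++ [(name, sc)], sc ≤ a.2) ∧ (∃ q ∈ pre ++ [(name, sc)], q.2 = sc) ∧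
          (1 + (L.countP (fun t => decide (sc < t.2)) : Int))
            = 1 + (L.countP (fun t => decide (sc < t.2)) : Int) := by
        intro _
        refine ⟨?_, ⟨(name, sc), by simp, rfl⟩, rfl⟩
        intro a ha
        rcases List.mem_append.mp ha with h | h
        · exact hpre_ge a h
        · simp at h; simp [h]
      have := ih (pre ++ [(name, sc)]) hsplit' (s ++ pvLine (1 + (L.countP (fun t => decide (sc < t.2)) : Int)) name sc)
        (1 + (L.countP (fun t => decide (sc < t.2)) : Int)) sc hinv'
      rw [hlen'] at this
      rw [this, List.map_cons, pvJoinCons, String.append_assoc]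

-- ===== VERDICT (by name: the statement is the Claim_ definition above) =====
theorem gen_rank_string_spec : Claim_equal_gen_rank_string := by
  intro points _
  unfold Spec_gen_rank_string gen_rank_string gen_rank_string_alt
  have hperm : ((PySem.List.sorted points (fun item => item.2)).reverse).Perm points :=
    (List.reverse_perm _).trans (PySem.List.sorted_perm points (fun item => item.2) false)
  have hPW : ((PySem.List.sorted points (fun item => item.2)).reverse).Pairwise
      (fun a b : String × Int => b.2 ≤ a.2) := by
    rw [List.pairwise_reverse]
    exact PySem.List.sorted_pairwise points (fun item => item.2)
  have hcnt : ∀ (x : Int), (points.map Prod.snd).countP (fun t => decide (x < t))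
      = ((PySem.List.sorted points (fun item => item.2)).reverse).countP
          (fun t => decide (x < t.2)) := by
    intro x
    rw [List.countP_map]
    exact (hperm.countP_eq _).symm
  have hmain := pvMain _ hPW ((PySem.List.sorted points (fun item => item.2)).reverse)
    [] rfl "" 0 0 (fun h => absurd rfl h)
  simp only [List.length_nil, Nat.cast_zero] at hmain
  rw [hmain]
  simp [hcnt]
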